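-- pv_equiv track=rewrite | github.com/KunihiroS/agentic-code-reasoning-skills | benchmark/swebench/prepare_pairs.py | strip_reproduce_script
-- ===== SOURCE A (Python) =====
-- def strip_reproduce_script(patch_text):
--     """Remove reproduce.py additions from agent patches."""
--     lines = patch_text.split("\n")
--     result = []
--     in_reproduce = False
--     for line in lines:
--         if line.startswith("diff --git") and "reproduce" in line.lower():
--             in_reproduce = True
--         elif line.startswith("diff --git"):
--             in_reproduce = False
--         if not in_reproduce:
--             result.append(line)
--     return "\n".join(result).strip()
-- ===== SOURCE B (Python) =====
-- def strip_reproduce_script(patch_text):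
--     """Remove reproduce.py additions from agent patches."""
--     lines = patch_text.split("\n")
--     sections = []
--     current = []
--     for line in lines:
--         if line.startswith("diff --git"):
--             sections.append(current)
--             current = [line]
--         else:
--             current.append(line)
--     sections.append(current)
--     kept = [sec for sec in sections
--             if not (sec and sec[0].startswith("diff --git") and "reproduce" in sec[0].lower())]
--     return "\n".join(ln for sec in kept for ln in sec).strip()
-- ===== Notes on version B (the rewrite author's own statement) =====
-- stated objective: alternative
-- what changed: Replaces A's one-pass scan with an in_reproduce flag by a two-phase decomposition: group the lines into a preamble plus one section per 'diff --git' header, filter out sections whose header names 'reproduce', then flatten, join and strip.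
import Mathlib
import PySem

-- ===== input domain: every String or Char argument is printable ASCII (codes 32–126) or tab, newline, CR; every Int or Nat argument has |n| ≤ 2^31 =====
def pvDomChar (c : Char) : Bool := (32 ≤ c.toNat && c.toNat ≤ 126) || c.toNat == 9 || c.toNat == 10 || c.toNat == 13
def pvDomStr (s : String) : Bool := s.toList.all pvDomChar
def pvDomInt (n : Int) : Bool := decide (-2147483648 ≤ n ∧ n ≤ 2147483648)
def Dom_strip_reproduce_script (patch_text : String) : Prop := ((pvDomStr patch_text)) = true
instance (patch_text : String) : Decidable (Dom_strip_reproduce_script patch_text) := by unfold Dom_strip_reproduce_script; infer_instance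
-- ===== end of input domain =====

-- B replaces A's one-pass in_reproduce flag scan by a two-phase group-into-sections-then-filter decomposition (objective: alternative, same cost).

-- ===== PORT A =====
-- A's flag update: the if/elif chain of A, in A's branch order
def pvFlag (inRep : Bool) (line : String) : Bool :=
  if PySem.Str.startswith line "diff --git" && PySem.Str.isIn "reproduce" (PySem.Str.lower line) then true
  else if PySem.Str.startswith line "diff --git" then false
  else inRep

-- A's loop body over the state (result, in_reproduce)
def pvAStep (st : List String × Bool) (line : String) : List String × Bool :=
  let inRep := pvFlag st.2 line
  ((if inRep then st.1 else st.1 ++ [line]), inRep)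

def strip_reproduce_script (patch_text : String) : String :=
  let lines := (PySem.Str.split? patch_text "\n").getD []   -- sep "\n" ≠ "", so split? is always some
  let result := (lines.foldl pvAStep ([], false)).1
  PySem.Str.strip (PySem.Str.join "\n" result)

-- ===== PORT B =====
-- group lines into the preamble plus one section per 'diff --git' header line (header included in its section)
def pvGroup : List String → List String → List (List String)
  | [], current => [current]
  | line :: rest, current =>
    if PySem.Str.startswith line "diff --git" then current :: pvGroup rest [line]
    else pvGroup rest (current ++ [line])

-- B's filter predicate: keep a section unless its first line is a 'reproduce' diff header
def pvKeep (sec : List String) : Bool :=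
  match sec with
  | [] => true
  | l :: _ => !(PySem.Str.startswith l "diff --git" && PySem.Str.isIn "reproduce" (PySem.Str.lower l))

def strip_reproduce_script_alt (patch_text : String) : String :=
  let lines := (PySem.Str.split? patch_text "\n").getD []   -- sep "\n" ≠ "", so split? is always some
  let sections := pvGroup lines []
  let kept := sections.filter pvKeep
  PySem.Str.strip (PySem.Str.join "\n" kept.flatten)

-- ===== PRECONDITION & SPEC =====
def Spec_strip_reproduce_script (patch_text : String) (out : String) : Prop := out = strip_reproduce_script_alt patch_text
instance (patch_text : String) (out : String) : Decidable (Spec_strip_reproduce_script patch_text out) := by unfold Spec_strip_reproduce_script; infer_instance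

-- ===== CLAIM (what is proved, stated in full; the proofs are below) =====
def Claim_equal_strip_reproduce_script : Prop := ∀ (patch_text : String), Dom_strip_reproduce_script patch_text → Spec_strip_reproduce_script patch_text (strip_reproduce_script patch_text)

-- ===== LEMMAS AND PROOFS =====

-- on a header line the new flag is exactly the 'reproduce' test
theorem pvFlag_header (flag : Bool) (l : String)
    (h : PySem.Str.startswith l "diff --git" = true) :
    pvFlag flag l = PySem.Str.isIn "reproduce" (PySem.Str.lower l) := by
  unfold pvFlag
  rw [h]
  cases PySem.Str.isIn "reproduce" (PySem.Str.lower l) <;> simp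

-- on a non-header line the flag is unchanged
theorem pvFlag_other (flag : Bool) (l : String)
    (h : PySem.Str.startswith l "diff --git" = false) :
    pvFlag flag l = flag := by
  unfold pvFlag
  rw [h]
  simp

-- A's fold only ever appends to the accumulated result list
theorem pvAStep_acc (ls : List String) (res : List String) (flag : Bool) :
    (ls.foldl pvAStep (res, flag)).1 = res ++ (ls.foldl pvAStep ([], flag)).1 := by
  induction ls generalizing res flag with
  | nil => simp
  | cons l ls ih =>
    simp only [List.foldl_cons, pvAStep]
    cases hf : pvFlag flag l
    · simp [ih (res ++ [l])]
      rw [ih [l] false]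
      rfl
    · rw [if_pos rfl, if_pos rfl]
      exact ih res true

-- appending a non-header line does not change a section's keep status
theorem pvKeep_append (cur : List String) (l : String)
    (h : PySem.Str.startswith l "diff --git" = false) :
    pvKeep (cur ++ [l]) = pvKeep cur := by
  cases cur with
  | nil => simp only [List.nil_append, pvKeep]; rw [h]; simp
  | cons c cs => rfl

-- a section headed by l is kept iff l is not a reproduce header
theorem pvKeep_single (l : String) (h : PySem.Str.startswith l "diff --git" = true) :
    pvKeep [l] = !(PySem.Str.isIn "reproduce" (PySem.Str.lower l)) := by
  simp only [pvKeep]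
  rw [h]
  simp

-- the bridge: B's filtered-and-flattened sections = current section (if kept) ++ A's remaining output
theorem pvBridge (ls : List String) (cur : List String) :
    ((pvGroup ls cur).filter pvKeep).flatten
      = (if pvKeep cur then cur else []) ++ (ls.foldl pvAStep ([], !pvKeep cur)).1 := by
  induction ls generalizing cur with
  | nil => cases h : pvKeep cur <;> simp [pvGroup, List.filter, h]
  | cons l ls ih =>
    cases hh : PySem.Str.startswith l "diff --git"
    · -- non-header: l joins the current section / A keeps its flag
      have hstep : pvAStep ([], !pvKeep cur) l
          = ((if pvKeep cur then [l] else []), !pvKeep cur) := by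
        simp only [pvAStep, pvFlag_other _ _ hh]
        cases h : pvKeep cur <;> simp
      simp only [pvGroup]
      rw [hh, if_neg (by simp), ih (cur ++ [l]), pvKeep_append cur l hh,
        List.foldl_cons, hstep]
      cases h : pvKeep cur
      · simp
      · simp [pvAStep_acc ls [l]]
    · -- header: a new section starts / A resets its flag from this line
      have hstep : pvAStep ([], !pvKeep cur) l
          = ((if pvKeep [l] then [l] else []), !pvKeep [l]) := by
        simp only [pvAStep, pvFlag_header _ _ hh, pvKeep_single l hh]
        cases hr : PySem.Str.isIn "reproduce" (PySem.Str.lower l) <;> simp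
      simp only [pvGroup]
      rw [hh, if_pos rfl, List.filter_cons, List.foldl_cons, hstep]
      cases h : pvKeep cur
      · rw [if_neg (by simp), ih [l]]
        cases hk : pvKeep [l]
        · simp
        · simp [pvAStep_acc ls [l]]
      · rw [if_pos rfl, if_pos rfl, List.flatten_cons, ih [l]]
        cases hk : pvKeep [l]
        · simp
        · simp [pvAStep_acc ls [l]]

-- putting the fold and the group-filter-flatten pipeline together on the full line list
theorem pv_lines_eq (lines : List String) :
    (lines.foldl pvAStep ([], false)).1 = ((pvGroup lines []).filter pvKeep).flatten := by
  rw [pvBridge lines []]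
  rfl

-- ===== VERDICT (by name: the statement is the Claim_ definition above) =====
theorem strip_reproduce_script_spec : Claim_equal_strip_reproduce_script := by
  intro patch_text _
  unfold Spec_strip_reproduce_script strip_reproduce_script strip_reproduce_script_alt
  exact congrArg (fun r => PySem.Str.strip (PySem.Str.join "\n" r)) (pv_lines_eq _)
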